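-- pv_equiv track=rewrite | github.com/sheynkman-lab/Long-Read-Proteogenomics | modules/PG_RefinedDatabaseGeneration/pacbio_structure_based_clustering/b_cluster_same_prot_struc_pacbio.py | make_internal_coord_string
-- ===== SOURCE A (Python) =====
-- def make_coord_string(infos):
--     # return a coordinate string
--     # e.g., input [chr1, +, [[50, 100], [150, 200]]]
--     #       output chr1+:50-100,150-200
--     chr, strand, coords = infos
--     coords_sorted = sorted(coords)
--     coord_str = chr + strand + ':' + ','.join(str(start) + '-' + str(end) for start, end in coords_sorted)
--     return coord_str
--
-- def make_internal_coord_string(infos):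
--     # return a coordinate string that represents the junctions
--     # in the case of mono-exon transcripts, return the start and end
--     # e.g., input [chr1, +, [[50, 100], [150, 200]]]
--     #       output chr1+:100,150
--     chr, strand, coords = infos
--     coords_sorted = sorted(coords)
--     if len(coords_sorted) == 1:
--         # for mono-exonic entries, return the full coords (start/end of exon)
--         return make_coord_string(infos)
--     else:
--         all_coords = ','.join(str(start) + '-' + str(end) for start, end in coords_sorted)
--         # trim the coords
--         internal_coords = '-'.join(all_coords.split('-')[1:-1])
--         internal_coords_str = chr + strand + ':' + internal_coords
--         return internal_coords_str
-- ===== SOURCE B (Python) =====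
-- def _tail_pieces(exons):
--     # pieces for the exons after the first: interior exons contribute
--     # 'start-end', the final exon contributes only 'start'
--     start, end = exons[0]
--     if len(exons) == 1:
--         return [str(start)]
--     return [str(start) + '-' + str(end)] + _tail_pieces(exons[1:])
--
-- def make_internal_coord_string(infos):
--     # build junction coordinates exon by exon: the first exon contributes its
--     # end, the last its start, interior exons both -- no join/split/rejoin
--     chr, strand, coords = infos
--     coords_sorted = sorted(coords)
--     if len(coords_sorted) == 1:
--         start, end = coords_sorted[0]
--         return chr + strand + ':' + str(start) + '-' + str(end)
--     if not coords_sorted: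
--         pieces = []
--     else:
--         pieces = [str(coords_sorted[0][1])] + _tail_pieces(coords_sorted[1:])
--     return chr + strand + ':' + ','.join(pieces)
-- ===== Notes on version B (the rewrite author's own statement) =====
-- stated objective: simpler
-- what changed: A joins all sorted exons into one 'start-end,...' string and trims it with '-'.join(all_coords.split('-')[1:-1]); B never builds the full string: it constructs the junction pieces exon by exon (first exon contributes str(end), interior exons str(start)+'-'+str(end), the last exon str(start), via a recursive helper) and joins them with ','.
-- intended difference: On multi-exon inputs whose first sorted exon has a negative start or whose last sorted exon has a negative end, A's split('-') treats the minus sign as a separator and returns a garbled string that still contains the outer start (e.g. 'chr1+:1-2,3' for exons [[-1,2],[3,4]]), while B returns the intended junction string 'chr1+:2,3'; per-exon construction is immune to signs. — e.g. on make_internal_coord_string("chr1", "+", [[-1, 2], [3, 4]]): A returns "chr1+:1-2,3", B returns "chr1+:2,3"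
import Mathlib
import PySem

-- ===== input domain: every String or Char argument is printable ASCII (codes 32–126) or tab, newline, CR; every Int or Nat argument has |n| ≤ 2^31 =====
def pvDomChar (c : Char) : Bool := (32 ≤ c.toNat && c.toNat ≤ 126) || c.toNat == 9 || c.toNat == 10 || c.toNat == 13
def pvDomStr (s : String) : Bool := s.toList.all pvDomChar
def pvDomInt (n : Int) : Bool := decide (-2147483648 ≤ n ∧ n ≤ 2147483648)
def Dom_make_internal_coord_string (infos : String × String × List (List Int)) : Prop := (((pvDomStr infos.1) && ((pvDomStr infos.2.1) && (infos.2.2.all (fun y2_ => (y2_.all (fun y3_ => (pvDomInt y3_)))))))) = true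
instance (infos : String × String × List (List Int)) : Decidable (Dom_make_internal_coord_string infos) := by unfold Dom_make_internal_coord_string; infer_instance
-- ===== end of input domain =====

-- B builds the junction pieces exon by exon (first exon: its end; interior:
-- start-end; last exon: its start) instead of A's join-everything-then-trim
-- with split('-')[1:-1]; on exon lists whose outer coordinates are negative
-- A's split on '-' garbles the string, B returns the intended junctions (D_).

-- shared helper: Python's tuple unpacking 'start, end = c' (raises unless c has
-- exactly two elements; Pre_ excludes the raising inputs, the default is unreachable)
def pvPair (c : List Int) : Int × Int :=
  match c with
  | [a, b] => (a, b)
  | _ => (0, 0)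

-- ===== PORT A =====
-- A's generator element str(start) + '-' + str(end)
def pvTok (c : List Int) : List Char :=
  PySem.Int.toChars (pvPair c).1 ++ '-' :: PySem.Int.toChars (pvPair c).2

def make_coord_string (infos : String × String × List (List Int)) : String :=
  let chr := infos.1
  let strand := infos.2.1
  let coords := infos.2.2
  let coords_sorted := PySem.List.sorted coords (fun x => x) false
  String.ofList (chr.toList ++ strand.toList ++ ':' ::
    PySem.Chars.join [','] (coords_sorted.map pvTok))

def make_internal_coord_string (infos : String × String × List (List Int)) : String :=
  let chr := infos.1
  let strand := infos.2.1
  let coords := infos.2.2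
  let coords_sorted := PySem.List.sorted coords (fun x => x) false
  if coords_sorted.length == 1 then
    make_coord_string infos
  else
    let all_coords := PySem.Chars.join [','] (coords_sorted.map pvTok)
    let internal_coords :=
      PySem.Chars.join ['-']
        (PySem.List.slice (PySem.Chars.splitOn all_coords ['-']) (some 1) (some (-1)))
    String.ofList (chr.toList ++ strand.toList ++ ':' :: internal_coords)

-- ===== PORT B =====
-- Source B's recursive helper _tail_pieces: pieces of the exons after the first
def pvTailPieces : List (List Int) → List (List Char)
  | [] => []  -- unreachable: Source B only calls it with a nonempty list
  | [c] => [PySem.Int.toChars (pvPair c).1]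
  | c :: d :: ds =>
      (PySem.Int.toChars (pvPair c).1 ++ '-' :: PySem.Int.toChars (pvPair c).2) ::
        pvTailPieces (d :: ds)

def make_internal_coord_string_alt (infos : String × String × List (List Int)) : String :=
  let chr := infos.1
  let strand := infos.2.1
  let coords := infos.2.2
  let coords_sorted := PySem.List.sorted coords (fun x => x) false
  if coords_sorted.length == 1 then
    let p := pvPair ((PySem.List.pyGet? coords_sorted 0).getD [])
    String.ofList (chr.toList ++ strand.toList ++ ':' ::
      (PySem.Int.toChars p.1 ++ '-' :: PySem.Int.toChars p.2))
  else
    let pieces :=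
      match coords_sorted with
      | [] => []
      | c :: rest =>
          -- Source B indexes coords_sorted[0][1] directly (no tuple unpacking here)
          PySem.Int.toChars ((PySem.List.pyGet? c 1).getD 0) :: pvTailPieces rest
    String.ofList (chr.toList ++ strand.toList ++ ':' :: PySem.Chars.join [','] pieces)

-- ===== PRECONDITION & SPEC =====
-- Pre_ excludes exactly the inputs where the Python raises: an exon list whose
-- entry does not have exactly two elements makes the unpacking 'start, end = …'
-- (in A and in B alike) raise ValueError.
def Pre_make_internal_coord_string (infos : String × String × List (List Int)) : Prop :=
  ∀ c ∈ infos.2.2, c.length = 2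
instance (infos : String × String × List (List Int)) : Decidable (Pre_make_internal_coord_string infos) := by unfold Pre_make_internal_coord_string; infer_instance

def pvWitness_make_internal_coord_string : (String × String × List (List Int)) :=
  ("chr1", "+", [[50, 100], [150, 200]])

-- On multi-exon inputs whose first sorted exon has a negative start or whose
-- last sorted exon has a negative end, A's split('-') treats the minus sign as
-- a separator and returns a garbled string still containing the outer start
-- (e.g. 'chr1+:1-2,3' for exons [[-1,2],[3,4]]), while B returns the intended
-- junction string 'chr1+:2,3'.
def D_make_internal_coord_string (infos : String × String × List (List Int)) : Prop :=
  let cs := PySem.List.sorted infos.2.2 (fun x => x) false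
  2 ≤ cs.length ∧ ((pvPair cs.headI).1 < 0 ∨ (pvPair (cs.getLastD [])).2 < 0)
instance (infos : String × String × List (List Int)) : Decidable (D_make_internal_coord_string infos) := by unfold D_make_internal_coord_string; infer_instance

def Spec_make_internal_coord_string (infos : String × String × List (List Int)) (out : String) : Prop := ¬ D_make_internal_coord_string infos → out = make_internal_coord_string_alt infos
instance (infos : String × String × List (List Int)) (out : String) : Decidable (Spec_make_internal_coord_string infos out) := by unfold Spec_make_internal_coord_string; infer_instance

def pvDiffWitness_make_internal_coord_string : (String × String × List (List Int)) :=
  ("chr1", "+", [[-1, 2], [3, 4]])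
def pvDiffWitnessOut_make_internal_coord_string : String × String :=
  ("chr1+:1-2,3", "chr1+:2,3")

-- ===== CLAIM (what is proved, stated in full; the proofs are below) =====
def Claim_unchanged_make_internal_coord_string : Prop := ∀ (infos : String × String × List (List Int)), Dom_make_internal_coord_string infos → Pre_make_internal_coord_string infos → Spec_make_internal_coord_string infos (make_internal_coord_string infos)
def Claim_changed_make_internal_coord_string : Prop := Dom_make_internal_coord_string (pvDiffWitness_make_internal_coord_string) ∧ Pre_make_internal_coord_string (pvDiffWitness_make_internal_coord_string) ∧ D_make_internal_coord_string (pvDiffWitness_make_internal_coord_string) ∧ make_internal_coord_string (pvDiffWitness_make_internal_coord_string) = pvDiffWitnessOut_make_internal_coord_string.1 ∧ make_internal_coord_string_alt (pvDiffWitness_make_internal_coord_string) = pvDiffWitnessOut_make_internal_coord_string.2 ∧ pvDiffWitnessOut_make_internal_coord_string.1 ≠ pvDiffWitnessOut_make_internal_coord_string.2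
def Claim_exact_make_internal_coord_string : Prop := ∀ (infos : String × String × List (List Int)), Dom_make_internal_coord_string infos → Pre_make_internal_coord_string infos → D_make_internal_coord_string infos → make_internal_coord_string infos ≠ make_internal_coord_string_alt infos

-- ===== LEMMAS AND PROOFS =====

-- A simple structural model of s.split('-') (single-character separator).
def mySplit : List Char → List (List Char)
  | [] => [[]]
  | c :: t =>
    if c = '-' then [] :: mySplit t
    else
      match mySplit t with
      | [] => [[c]]
      | h :: tl => (c :: h) :: tl

theorem mySplit_ne_nil (l : List Char) : mySplit l ≠ [] := by
  cases l with
  | nil => simp [mySplit]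
  | cons c t =>
    simp only [mySplit]
    split
    · simp
    · split <;> simp_all

theorem two_le_mySplit_length (l : List Char) (h : '-' ∈ l) : 2 ≤ (mySplit l).length := by
  induction l with
  | nil => cases h
  | cons c t ih =>
    simp only [mySplit]
    by_cases hc : c = '-'
    · subst hc
      have h2 : 0 < (mySplit t).length := List.length_pos_iff.mpr (mySplit_ne_nil t)
      simp
      omega
    · rw [if_neg hc]
      have ht : '-' ∈ t := by
        rcases List.mem_cons.mp h with h1 | h1
        · exact absurd h1.symm hc
        · exact h1
      have h2 := ih ht
      cases hm : mySplit t with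
      | nil => exact absurd hm (mySplit_ne_nil t)
      | cons a b => rw [hm] at h2; simpa using h2

theorem splitOn_go_nil (fuel : Nat) (cur : List Char) (acc : List (List Char)) :
    PySem.Chars.splitOn.go ['-'] fuel [] cur acc = (cur.reverse :: acc).reverse := by
  rw [PySem.Chars.splitOn.go.eq_def]; cases fuel <;> simp

theorem splitOn_go_cons (f : Nat) (c : Char) (rest cur : List Char) (acc : List (List Char)) :
    PySem.Chars.splitOn.go ['-'] (f + 1) (c :: rest) cur acc =
      if ['-'].isPrefixOf (c :: rest) then
        PySem.Chars.splitOn.go ['-'] f rest [] (cur.reverse :: acc)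
      else PySem.Chars.splitOn.go ['-'] f rest (c :: cur) acc := by
  rw [PySem.Chars.splitOn.go.eq_def]; simp

theorem splitOn_go_spec (l : List Char) : ∀ (fuel : Nat), l.length ≤ fuel →
    ∀ (cur : List Char) (acc : List (List Char)),
    PySem.Chars.splitOn.go ['-'] fuel l cur acc =
      acc.reverse ++ (match mySplit l with
        | [] => [cur.reverse]
        | h :: tl => (cur.reverse ++ h) :: tl) := by
  induction l with
  | nil => intro fuel _ cur acc; rw [splitOn_go_nil]; simp [mySplit]
  | cons c rest ih =>
    intro fuel hfuel cur acc
    cases fuel with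
    | zero => simp at hfuel
    | succ f =>
      rw [splitOn_go_cons]
      have hf : rest.length ≤ f := by simpa using hfuel
      have hpre : (['-'].isPrefixOf (c :: rest)) = (c == '-') := by
        simp [List.isPrefixOf, Bool.and_comm, BEq.comm]
      rw [hpre]
      by_cases hc : c = '-'
      · rw [if_pos (by simp [hc])]
        rw [ih f hf [] (cur.reverse :: acc)]
        cases hm : mySplit rest with
        | nil => exact absurd hm (mySplit_ne_nil rest)
        | cons h tl => simp [mySplit, hc, hm]
      · rw [if_neg (by simp [hc])]
        rw [ih f hf (c :: cur) acc]
        cases hm : mySplit rest with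
        | nil => exact absurd hm (mySplit_ne_nil rest)
        | cons h tl => simp [mySplit, hc, hm]

theorem splitOn_eq_mySplit (l : List Char) :
    PySem.Chars.splitOn l ['-'] = mySplit l := by
  unfold PySem.Chars.splitOn
  rw [splitOn_go_spec l (l.length + 1) (by omega) [] []]
  cases hm : mySplit l with
  | nil => exact absurd hm (mySplit_ne_nil l)
  | cons h tl => simp

theorem mySplit_no_dash (u : List Char) (hu : '-' ∉ u) : mySplit u = [u] := by
  induction u with
  | nil => rfl
  | cons c t ih =>
    have hc : c ≠ '-' := fun h => hu (h ▸ List.mem_cons_self)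
    have ht : '-' ∉ t := fun h => hu (List.mem_cons_of_mem _ h)
    simp [mySplit, hc, ih ht]

theorem mySplit_append_dash (p u : List Char) (hp : '-' ∉ p) :
    mySplit (p ++ '-' :: u) = p :: mySplit u := by
  induction p with
  | nil => simp [mySplit]
  | cons c q ih =>
    have hc : c ≠ '-' := fun h => hp (h ▸ List.mem_cons_self)
    have hq : '-' ∉ q := fun h => hp (List.mem_cons_of_mem _ h)
    simp [mySplit, hc, ih hq]

theorem slice_one_neg_one {α : Type} (l : List α) :
    PySem.List.slice l (some 1) (some (-1)) = l.tail.dropLast := by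
  cases l with
  | nil => simp [PySem.List.slice, PySem.List.clampIdx]
  | cons x xs =>
    have ha : PySem.List.clampIdx (x :: xs).length 1 = 1 := by
      simp [PySem.List.clampIdx]
    have hb : PySem.List.clampIdx (x :: xs).length (-1) = xs.length := by
      simp [PySem.List.clampIdx]
    simp only [PySem.List.slice, ha, hb]
    simp [List.dropLast_eq_take]

theorem join_cons_head (c : Char) (h : List Char) (Z : List (List Char)) :
    PySem.Chars.join ['-'] ((c :: h) :: Z) = c :: PySem.Chars.join ['-'] (h :: Z) := by
  cases Z with
  | nil => simp [PySem.Chars.join_singleton]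
  | cons z zs => simp [PySem.Chars.join_cons_cons]

theorem core_trim (m : List Char) : ∀ (r : List Char), '-' ∉ r →
    PySem.Chars.join ['-'] ((mySplit (m ++ '-' :: r)).dropLast) = m := by
  induction m with
  | nil =>
    intro r hr
    have : mySplit ([] ++ '-' :: r) = [] :: mySplit r := mySplit_append_dash [] r (by simp)
    rw [this, mySplit_no_dash r hr]
    simp [PySem.Chars.join_singleton]
  | cons c m' ih =>
    intro r hr
    have hmem : '-' ∈ m' ++ '-' :: r := List.mem_append_right _ List.mem_cons_self
    have h2 := two_le_mySplit_length _ hmem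
    by_cases hc : c = '-'
    · subst hc
      have hstep : mySplit (('-' :: m') ++ '-' :: r) = [] :: mySplit (m' ++ '-' :: r) := by
        simp [mySplit]
      rw [hstep]
      cases hm : mySplit (m' ++ '-' :: r) with
      | nil => exact absurd hm (mySplit_ne_nil _)
      | cons h tl =>
        cases tl with
        | nil => rw [hm] at h2; simp at h2
        | cons t1 ts =>
          have hIH := ih r hr
          rw [hm] at hIH
          rw [List.dropLast_cons_of_ne_nil (by simp)] at hIH
          rw [List.dropLast_cons_of_ne_nil (by simp),
            List.dropLast_cons_of_ne_nil (by simp)]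
          rw [PySem.Chars.join_cons_cons]
          simp [hIH]
    · have hstep : mySplit ((c :: m') ++ '-' :: r) =
          match mySplit (m' ++ '-' :: r) with
          | [] => [[c]]
          | h :: tl => (c :: h) :: tl := by
        simp [mySplit, hc]
      cases hm : mySplit (m' ++ '-' :: r) with
      | nil => exact absurd hm (mySplit_ne_nil _)
      | cons h tl =>
        rw [hm] at hstep
        rw [hstep]
        cases tl with
        | nil => rw [hm] at h2; simp at h2
        | cons t1 ts =>
          have hIH := ih r hr
          rw [hm] at hIH
          rw [List.dropLast_cons_of_ne_nil (by simp)] at hIH ⊢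
          rw [join_cons_head]
          rw [hIH]

-- A's whole trimming step, for a string of shape P-m-r with dash-free P and r.
theorem trim_spec (P m r : List Char) (hP : '-' ∉ P) (hr : '-' ∉ r) :
    PySem.Chars.join ['-']
      (PySem.List.slice (PySem.Chars.splitOn (P ++ '-' :: (m ++ '-' :: r)) ['-'])
        (some 1) (some (-1))) = m := by
  rw [splitOn_eq_mySplit, mySplit_append_dash P _ hP, slice_one_neg_one]
  simp only [List.tail_cons]
  exact core_trim m r hr

-- decimal digit characters are never '-'
theorem digitChar_ne_dash : ∀ (m : Nat), Nat.digitChar m ≠ '-'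
  | 0 => by decide
  | 1 => by decide
  | 2 => by decide
  | 3 => by decide
  | 4 => by decide
  | 5 => by decide
  | 6 => by decide
  | 7 => by decide
  | 8 => by decide
  | 9 => by decide
  | 10 => by decide
  | 11 => by decide
  | 12 => by decide
  | 13 => by decide
  | 14 => by decide
  | 15 => by decide
  | (n + 16) => by simp [Nat.digitChar]

theorem mem_toDigitsCore (b : Nat) : ∀ (f n : Nat) (acc : List Char) (c : Char),
    c ∈ Nat.toDigitsCore b f n acc → c ∈ acc ∨ ∃ m, c = Nat.digitChar m := by
  intro f
  induction f with
  | zero => intro n acc c h; exact Or.inl h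
  | succ f ih =>
    intro n acc c h
    simp only [Nat.toDigitsCore] at h
    split at h
    · rcases List.mem_cons.mp h with h1 | h1
      · exact Or.inr ⟨n % b, h1⟩
      · exact Or.inl h1
    · rcases ih (n / b) (Nat.digitChar (n % b) :: acc) c h with h1 | h1
      · rcases List.mem_cons.mp h1 with h2 | h2
        · exact Or.inr ⟨n % b, h2⟩
        · exact Or.inl h2
      · exact Or.inr h1

theorem no_dash_toDigits (b n : Nat) : '-' ∉ Nat.toDigits b n := by
  intro h
  rcases mem_toDigitsCore b (n + 1) n [] '-' h with h1 | ⟨m, hm⟩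
  · cases h1
  · exact digitChar_ne_dash m hm.symm

theorem no_dash_toChars (n : Int) (h : 0 ≤ n) : '-' ∉ PySem.Int.toChars n := by
  unfold PySem.Int.toChars
  rw [if_neg (by omega)]
  exact no_dash_toDigits 10 n.toNat

theorem toChars_neg (n : Int) (h : n < 0) :
    PySem.Int.toChars n = '-' :: Nat.toDigits 10 n.natAbs := by
  unfold PySem.Int.toChars
  rw [if_pos h]

-- the joined tokens of a nonempty tail, split off at the last exon's end
theorem tail_join : ∀ (r : List Int) (rs : List (List Int)),
    PySem.Chars.join [','] (pvTok r :: rs.map pvTok) =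
      PySem.Chars.join [','] (pvTailPieces (r :: rs)) ++
        '-' :: PySem.Int.toChars (pvPair ((r :: rs).getLast (by simp))).2 := by
  intro r rs
  induction rs generalizing r with
  | nil => simp [pvTailPieces, PySem.Chars.join_singleton, pvTok]
  | cons r2 rs2 ih =>
    have hlast : (r :: r2 :: rs2).getLast (by simp) = (r2 :: rs2).getLast (by simp) := by
      simp [List.getLast_cons]
    simp only [List.map_cons]
    rw [PySem.Chars.join_cons_cons, ih r2, hlast]
    show pvTok r ++ [','] ++ (PySem.Chars.join [','] (pvTailPieces (r2 :: rs2)) ++ '-' :: _) =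
      PySem.Chars.join [','] ((PySem.Int.toChars (pvPair r).1 ++ '-' :: PySem.Int.toChars (pvPair r).2) :: pvTailPieces (r2 :: rs2)) ++ '-' :: _
    cases hpt : pvTailPieces (r2 :: rs2) with
    | nil => cases rs2 <;> simp [pvTailPieces] at hpt
    | cons z zs =>
      rw [PySem.Chars.join_cons_cons]
      simp [pvTok]

-- the full joined exon string, decomposed around its outer start and end
theorem all_decomp (c0 r : List Int) (rs : List (List Int)) :
    PySem.Chars.join [','] ((c0 :: r :: rs).map pvTok) =
      PySem.Int.toChars (pvPair c0).1 ++
        '-' :: ((PySem.Chars.join [',']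
            (PySem.Int.toChars (pvPair c0).2 :: pvTailPieces (r :: rs))) ++
          '-' :: PySem.Int.toChars (pvPair ((r :: rs).getLast (by simp))).2) := by
  simp only [List.map_cons]
  rw [PySem.Chars.join_cons_cons, tail_join r rs]
  cases hpt : pvTailPieces (r :: rs) with
  | nil => cases rs <;> simp [pvTailPieces] at hpt
  | cons z zs =>
    rw [PySem.Chars.join_cons_cons]
    simp [pvTok]

-- the last exon of the sorted list, as D_ reads it
theorem getLastD_eq_getLast : ∀ (l : List (List Int)) (h : l ≠ []) (d : List Int),
    l.getLastD d = l.getLast h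
  | [_], _, _ => rfl
  | c :: d' :: ds, _, d => by
    rw [List.getLastD_cons, List.getLast_cons (by simp)]
    exact getLastD_eq_getLast (d' :: ds) (by simp) c

theorem getLastD_cons_cons (c0 r : List Int) (rs : List (List Int)) :
    (c0 :: r :: rs).getLastD [] = (r :: rs).getLast (by simp) := by
  rw [List.getLastD_cons]
  exact getLastD_eq_getLast (r :: rs) (by simp) c0

theorem ofList_inj (a b : List Char) (h : String.ofList a = String.ofList b) : a = b := by
  have := congrArg String.toList h
  simpa using this

-- Source B's coords_sorted[0][1] agrees with the unpacked pair on length-2 exons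
theorem pyGet1_of_len2 (c : List Int) (h : c.length = 2) :
    (PySem.List.pyGet? c 1).getD 0 = (pvPair c).2 := by
  rcases c with _ | ⟨a, _ | ⟨b, _ | _⟩⟩ <;>
    simp_all [PySem.List.pyGet?, PySem.List.pyIdx?, pvPair]

-- internal string of A on a multi-exon list, with the outer-sign cases worked out
theorem a_internal (c0 r : List Int) (rs : List (List Int)) :
    ∃ X : List Char,
      PySem.Chars.join ['-']
        (PySem.List.slice
          (PySem.Chars.splitOn (PySem.Chars.join [','] ((c0 :: r :: rs).map pvTok)) ['-'])
          (some 1) (some (-1))) = X ∧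
      (0 ≤ (pvPair c0).1 ∧ 0 ≤ (pvPair ((r :: rs).getLast (by simp))).2 →
        X = PySem.Chars.join [',']
          (PySem.Int.toChars (pvPair c0).2 :: pvTailPieces (r :: rs))) ∧
      ((pvPair c0).1 < 0 ∨ (pvPair ((r :: rs).getLast (by simp))).2 < 0 →
        (PySem.Chars.join [',']
          (PySem.Int.toChars (pvPair c0).2 :: pvTailPieces (r :: rs))).length < X.length) := by
  rw [all_decomp]
  set M := PySem.Chars.join [',']
    (PySem.Int.toChars (pvPair c0).2 :: pvTailPieces (r :: rs)) with hM
  set s0 := (pvPair c0).1 with hs0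
  set el := (pvPair ((r :: rs).getLast (by simp))).2 with hel
  by_cases h0 : 0 ≤ s0
  · by_cases hl : 0 ≤ el
    · refine ⟨M, ?_, fun _ => rfl, fun h => by omega⟩
      exact trim_spec _ _ _ (no_dash_toChars _ h0) (no_dash_toChars _ hl)
    · -- last end negative: its sign '-' becomes the last separator
      refine ⟨M ++ ['-'], ?_, fun h => by omega, fun _ => by simp⟩
      rw [toChars_neg el (by omega)]
      have hsh : M ++ '-' :: ('-' :: Nat.toDigits 10 el.natAbs) =
          (M ++ ['-']) ++ '-' :: Nat.toDigits 10 el.natAbs := by simp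
      rw [hsh]
      exact trim_spec _ _ _ (no_dash_toChars _ h0) (no_dash_toDigits 10 _)
  · -- first start negative: its sign '-' becomes the first separator
    rw [toChars_neg s0 (by omega)]
    by_cases hl : 0 ≤ el
    · refine ⟨Nat.toDigits 10 s0.natAbs ++ '-' :: M, ?_, fun h => by omega,
        fun _ => by simp; omega⟩
      have hsh : ('-' :: Nat.toDigits 10 s0.natAbs) ++ '-' :: (M ++ '-' :: PySem.Int.toChars el) =
          [] ++ '-' :: ((Nat.toDigits 10 s0.natAbs ++ '-' :: M) ++ '-' :: PySem.Int.toChars el) := by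
        simp
      rw [hsh]
      exact trim_spec _ _ _ (by simp) (no_dash_toChars _ hl)
    · refine ⟨Nat.toDigits 10 s0.natAbs ++ '-' :: (M ++ ['-']), ?_, fun h => by omega,
        fun _ => by simp; omega⟩
      rw [toChars_neg el (by omega)]
      have hsh : ('-' :: Nat.toDigits 10 s0.natAbs) ++
            '-' :: (M ++ '-' :: ('-' :: Nat.toDigits 10 el.natAbs)) =
          [] ++ '-' :: ((Nat.toDigits 10 s0.natAbs ++ '-' :: (M ++ ['-'])) ++
            '-' :: Nat.toDigits 10 el.natAbs) := by
        simp
      rw [hsh]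
      exact trim_spec _ _ _ (by simp) (no_dash_toDigits 10 _)

-- ===== VERDICT (by name: the statements are the Claim_ definitions above) =====
theorem make_internal_coord_string_spec : Claim_unchanged_make_internal_coord_string := by
  intro infos _ hPre
  unfold Spec_make_internal_coord_string
  intro hD
  obtain ⟨chr, strand, coords⟩ := infos
  unfold D_make_internal_coord_string at hD
  unfold make_internal_coord_string make_internal_coord_string_alt
  simp only [] at hD ⊢
  set cs := PySem.List.sorted coords (fun x => x) false with hcs
  by_cases hlen : cs.length == 1
  · rw [if_pos hlen, if_pos hlen]
    obtain ⟨x, hx⟩ := List.length_eq_one_iff.mp (by simpa using hlen)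
    unfold make_coord_string
    simp only []
    rw [← hcs, hx]
    simp [PySem.Chars.join_singleton, PySem.List.pyGet?, PySem.List.pyIdx?, pvTok]
  · rw [if_neg (by simpa using hlen), if_neg (by simpa using hlen)]
    cases hcs' : cs with
    | nil =>
      simp [splitOn_eq_mySplit, mySplit, slice_one_neg_one, PySem.Chars.join_nil]
    | cons c0 rest =>
      cases hrest : rest with
      | nil => rw [hcs', hrest] at hlen; simp at hlen
      | cons r rs =>
        obtain ⟨X, hX, hXeq, _⟩ := a_internal c0 r rs
        rw [hX]
        have hnd : ¬ ((pvPair cs.headI).1 < 0 ∨ (pvPair (cs.getLastD [])).2 < 0) := by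
          intro hor
          exact hD ⟨by rw [hcs', hrest]; simp, hor⟩
        rw [hcs', hrest, getLastD_cons_cons] at hnd
        simp only [List.headI] at hnd
        have hc0 : c0.length = 2 := by
          apply hPre
          exact (PySem.List.mem_sorted _ _ _ _).mp (by rw [← hcs, hcs', hrest]; exact List.mem_cons_self)
        rw [hXeq ⟨by omega, by omega⟩]
        simp [pyGet1_of_len2 c0 hc0]

theorem make_internal_coord_string_changed : Claim_changed_make_internal_coord_string := by
  unfold Claim_changed_make_internal_coord_string; decide

theorem make_internal_coord_string_tight : Claim_exact_make_internal_coord_string := by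
  intro infos _ hPre hD
  obtain ⟨chr, strand, coords⟩ := infos
  unfold D_make_internal_coord_string at hD
  unfold make_internal_coord_string make_internal_coord_string_alt
  simp only [] at hD ⊢
  set cs := PySem.List.sorted coords (fun x => x) false with hcs
  obtain ⟨hlen2, hor⟩ := hD
  have hlen : ¬ (cs.length == 1) := by
    simp only [beq_iff_eq]
    omega
  rw [if_neg (by simpa using hlen), if_neg (by simpa using hlen)]
  cases hcs' : cs with
  | nil => rw [hcs'] at hlen2; simp at hlen2
  | cons c0 rest =>
    cases hrest : rest with
    | nil => rw [hcs', hrest] at hlen2; simp at hlen2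
    | cons r rs =>
      obtain ⟨X, hX, _, hXlt⟩ := a_internal c0 r rs
      rw [hX]
      have hc0 : c0.length = 2 := by
        apply hPre
        exact (PySem.List.mem_sorted _ _ _ _).mp (by rw [← hcs, hcs', hrest]; exact List.mem_cons_self)
      rw [hcs', hrest, getLastD_cons_cons] at hor
      simp only [List.headI] at hor
      have hlt := hXlt hor
      intro heq
      have hlists := ofList_inj _ _ heq
      simp only [pyGet1_of_len2 c0 hc0] at hlists
      have h1 := List.append_cancel_left hlists
      have h2 : X = PySem.Chars.join [',']
          (PySem.Int.toChars (pvPair c0).2 :: pvTailPieces (r :: rs)) := by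
        simpa using h1
      rw [h2] at hlt
      omega
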